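-- pv_equiv track=rewrite | github.com/adpena/molt | src/molt/stdlib/tinygrad/tensor.py | _shrink_data
-- ===== SOURCE A (Python) =====
-- def _shrink_data(flat: list, shape: tuple, bounds: list) -> list:
--     """Extract sub-region from flat data."""
--     ndim = len(shape)
--     new_shape = tuple(e - s for s, e in bounds)
--     numel = 1
--     for s in new_shape:
--         numel *= s
--     result = [0.0] * numel
--
--     for idx in range(numel):
--         # Decompose output index
--         remaining = idx
--         src_idx = 0
--         src_stride = 1
--         for d in range(ndim - 1, -1, -1):
--             dim_idx = remaining % new_shape[d]
--             remaining //= new_shape[d]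
--             src_dim_idx = dim_idx + bounds[d][0]
--             src_idx += src_dim_idx * src_stride
--             src_stride *= shape[d]
--
--         result[idx] = flat[src_idx]
--
--     return result
-- ===== SOURCE B (Python) =====
-- def _shrink_data(flat: list, shape: tuple, bounds: list) -> list:
--     """Extract sub-region from flat data (stride-precomputed recursive walk)."""
--     # Empty region -> empty result.
--     if any(e <= s for s, e in bounds):
--         return []
--     # Precompute source strides once: strides[d] = product of shape[d+1:].
--     strides = []
--     st = 1
--     for s in reversed(shape):
--         strides.append(st)
--         st *= s
--     strides.reverse()
--
--     def go(bs, off, out):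
--         if not bs:
--             out.append(flat[off])
--             return
--         (s, e), st = bs[0]
--         rest = bs[1:]
--         for i in range(s, e):
--             go(rest, off + i * st, out)
--
--     out = []
--     go(list(zip(bounds, strides)), 0, out)
--     return out
-- ===== Notes on version B (the rewrite author's own statement) =====
-- stated objective: alternative
-- what changed: A decomposes every output index with ndim divmods to recover its source index; B short-circuits empty regions, precomputes the source strides once, and walks the bound ranges recursively, carrying the source offset incrementally.
-- outside the precondition, e.g. on _shrink_data([1, 2, 3], (3,), [(0, 2), (0, 2)]): A returns [1, 2, 1, 2], B returns [1, 2]; on _shrink_data([9, 8, 7, 6], (2, 2), [(1, 0), (1, 0)]): A returns [6], B returns []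
import Mathlib
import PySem

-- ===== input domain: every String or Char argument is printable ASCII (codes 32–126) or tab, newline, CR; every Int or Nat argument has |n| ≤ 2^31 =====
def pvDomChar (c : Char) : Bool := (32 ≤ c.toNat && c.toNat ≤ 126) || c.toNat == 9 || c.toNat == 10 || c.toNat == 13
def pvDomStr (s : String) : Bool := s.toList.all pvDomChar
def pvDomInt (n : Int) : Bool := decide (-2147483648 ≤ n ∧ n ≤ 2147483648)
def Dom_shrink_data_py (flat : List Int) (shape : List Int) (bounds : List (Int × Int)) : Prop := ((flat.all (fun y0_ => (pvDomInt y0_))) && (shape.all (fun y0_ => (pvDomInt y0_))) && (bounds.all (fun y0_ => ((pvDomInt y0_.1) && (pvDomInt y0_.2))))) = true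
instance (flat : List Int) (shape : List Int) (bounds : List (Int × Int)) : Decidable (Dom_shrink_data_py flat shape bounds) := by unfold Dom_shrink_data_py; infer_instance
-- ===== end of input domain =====

-- B replaces A's per-element index decomposition (ndim divmods for every output element) with
-- precomputed strides and a recursive walk over the bound ranges that carries the source offset
-- incrementally (objective: alternative).

-- ===== PORT A =====
-- A's inner loop 'for d in range(ndim - 1, -1, -1)', threading (remaining, src_idx, src_stride)
def shrinkInner (new_shape : List Int) (bounds : List (Int × Int)) (shape : List Int)
    (ndim : Int) (idx : Int) : Int × Int × Int :=
  (PySem.List.pyRange (ndim - 1) (-1) (-1)).foldl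
    (fun st d =>
      let dim_idx := PySem.Int.mod st.1 (PySem.List.pyGetD new_shape d 0)
      let remaining := PySem.Int.floordiv st.1 (PySem.List.pyGetD new_shape d 0)
      let src_dim_idx := dim_idx + (PySem.List.pyGetD bounds d ((0 : Int), (0 : Int))).1
      (remaining, st.2.1 + src_dim_idx * st.2.2, st.2.2 * PySem.List.pyGetD shape d 0))
    (idx, 0, 1)

-- Python's '[0.0] * numel' placeholder is written with 0 : Int: under Pre_ every cell is
-- overwritten before the list is returned, so the placeholder value never appears in the result.
def shrink_data_py (flat : List Int) (shape : List Int) (bounds : List (Int × Int)) : List Int :=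
  let ndim : Int := PySem.List.len shape
  let new_shape : List Int := bounds.map (fun b => b.2 - b.1)
  let numel : Int := new_shape.foldl (fun acc s => acc * s) 1
  let result : List Int := List.replicate numel.toNat 0
  (PySem.List.pyRange 0 numel 1).foldl
    (fun result idx =>
      PySem.List.pySetD result idx
        (PySem.List.pyGetD flat (shrinkInner new_shape bounds shape ndim idx).2.1 0))
    result

-- ===== PORT B =====
-- B's 'for i in range(s, e): go(rest, off + i*st, out)'
def altLoop (g : Int → List Int → List Int) (st : Int) : List Int → Int → List Int → List Int
  | [], _, out => out
  | i :: is, off, out => altLoop g st is off (g (off + i * st) out)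

-- B's recursive helper go(bs, off, out) over the zipped (bound, stride) list
def altGo (flat : List Int) : List ((Int × Int) × Int) → Int → List Int → List Int
  | [], off, out => out ++ [PySem.List.pyGetD flat off 0]
  | b :: rest, off, out =>
      altLoop (fun o acc => altGo flat rest o acc) b.2
        (PySem.List.pyRange b.1.1 b.1.2 1) off out

def shrink_data_py_alt (flat : List Int) (shape : List Int) (bounds : List (Int × Int)) : List Int :=
  if bounds.any (fun b => decide (b.2 ≤ b.1)) then []
  else
    let p := shape.reverse.foldl (fun (p : List Int × Int) s => (p.1 ++ [p.2], p.2 * s)) ([], 1)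
    let strides := p.1.reverse
    altGo flat (bounds.zip strides) 0 []

-- ===== PRECONDITION & SPEC =====
-- Pre_ admits the two regimes in which A's behaviour is the specified one: an empty region
-- (the product of the bound extents is ≤ 0, so the result is empty), or the natural domain
-- (len(bounds) = len(shape), every bound inside [0, shape[d]] with s ≤ e, and flat covering
-- the shape); outside these A raises IndexError or returns accidental values (wrapped
-- decomposition when bounds is longer than shape, a non-empty result for an empty (e < s)
-- bound region whose extents multiply to a positive count).
def Pre_shrink_data_py (flat : List Int) (shape : List Int) (bounds : List (Int × Int)) : Prop :=
  (bounds.map (fun b => b.2 - b.1)).prod ≤ 0 ∨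
  (shape.length = bounds.length ∧
   (∀ p ∈ bounds.zip shape, 0 ≤ p.1.1 ∧ p.1.1 ≤ p.1.2 ∧ p.1.2 ≤ p.2) ∧
   shape.foldl (fun acc s => acc * s) 1 ≤ (flat.length : Int))
instance (flat : List Int) (shape : List Int) (bounds : List (Int × Int)) : Decidable (Pre_shrink_data_py flat shape bounds) := by unfold Pre_shrink_data_py; infer_instance

def pvWitness_shrink_data_py : List Int × List Int × (List (Int × Int)) :=
  ([1, 2, 3, 4, 5, 6], [2, 3], [(0, 2), (1, 3)])

def Spec_shrink_data_py (flat : List Int) (shape : List Int) (bounds : List (Int × Int)) (out : List Int) : Prop := out = shrink_data_py_alt flat shape bounds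
instance (flat : List Int) (shape : List Int) (bounds : List (Int × Int)) (out : List Int) : Decidable (Spec_shrink_data_py flat shape bounds out) := by unfold Spec_shrink_data_py; infer_instance

-- ===== CLAIM (what is proved, stated in full; the proofs are below) =====
def Claim_equal_shrink_data_py : Prop := ∀ (flat : List Int) (shape : List Int) (bounds : List (Int × Int)), Dom_shrink_data_py flat shape bounds → Pre_shrink_data_py flat shape bounds → Spec_shrink_data_py flat shape bounds (shrink_data_py flat shape bounds)

-- ===== LEMMAS AND PROOFS =====

-- trips = bounds.zip shape; trip t has bound (t.1.1, t.1.2), dimension t.1.2 - t.1.1, shape entry t.2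
def dimsProd : List ((Int × Int) × Int) → Int
  | [] => 1
  | t :: L => (t.1.2 - t.1.1) * dimsProd L

def shpProd : List ((Int × Int) × Int) → Int
  | [] => 1
  | t :: L => shpProd L * t.2

-- closed form of A's inner loop: source index of output index r
def gsrc : List ((Int × Int) × Int) → Int → Int
  | [], _ => 0
  | t :: L, r =>
      gsrc L (PySem.Int.mod r (dimsProd L)) +
        (PySem.Int.floordiv r (dimsProd L) + t.1.1) * shpProd L

-- A's inner loop body as a foldr step over trips
def bodyA (t : (Int × Int) × Int) (st : Int × Int × Int) : Int × Int × Int :=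
  (PySem.Int.floordiv st.1 (t.1.2 - t.1.1),
   st.2.1 + (PySem.Int.mod st.1 (t.1.2 - t.1.1) + t.1.1) * st.2.2,
   st.2.2 * t.2)

-- accumulator-free version of B's walk
def pureGo (flat : List Int) : List ((Int × Int) × Int) → Int → List Int
  | [], off => [PySem.List.pyGetD flat off 0]
  | t :: L, off =>
      (PySem.List.pyRange t.1.1 t.1.2 1).flatMap (fun i => pureGo flat L (off + i * shpProd L))

def pref : List Int → Int → List Int
  | [], _ => []
  | x :: xs, st => st :: pref xs (st * x)

def sufProds : List Int → List Int
  | [] => []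
  | _ :: l => l.prod :: sufProds l

lemma dimsProd_nonneg (L : List ((Int × Int) × Int)) (h : ∀ t ∈ L, 0 ≤ t.1.2 - t.1.1) :
    0 ≤ dimsProd L := by
  induction L with
  | nil => norm_num [dimsProd]
  | cons t L ih =>
      have := h t (by simp)
      have := ih (fun t ht => h t (by simp [ht]))
      simp only [dimsProd]; positivity

lemma dimsProd_pos (L : List ((Int × Int) × Int)) (h : ∀ t ∈ L, 0 < t.1.2 - t.1.1) :
    0 < dimsProd L := by
  induction L with
  | nil => norm_num [dimsProd]
  | cons t L ih =>
      have := h t (by simp)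
      have := ih (fun t ht => h t (by simp [ht]))
      simp only [dimsProd]; positivity

lemma dims_pos_of_prod_pos (L : List ((Int × Int) × Int)) (h : ∀ t ∈ L, 0 ≤ t.1.2 - t.1.1)
    (hp : 0 < dimsProd L) : ∀ t ∈ L, 0 < t.1.2 - t.1.1 := by
  induction L with
  | nil => simp
  | cons t L ih =>
      have h0 := h t (by simp)
      have hL := dimsProd_nonneg L (fun t ht => h t (by simp [ht]))
      simp only [dimsProd] at hp
      intro u hu
      rcases List.mem_cons.1 hu with rfl | hu
      · nlinarith
      · exact ih (fun t ht => h t (by simp [ht])) (by nlinarith) u hu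

-- (a % (c*b)) / b = (a / b) % c for positive b, c
lemma emod_mul_ediv' (a b c : Int) (hb : 0 < b) (hc : 0 < c) :
    (a % (c * b)) / b = (a / b) % c := by
  have h1 : a % (c*b) + c*b * (a / (c*b)) = a := by
    have := Int.emod_add_mul_ediv a (c*b); linarith
  set R := a % (c*b) with hR
  have hR0 : 0 ≤ R := Int.emod_nonneg a (by positivity)
  have hRlt : R < c*b := Int.emod_lt_of_pos a (mul_pos hc hb)
  have key : a = R + ((a / (c*b)) * c) * b := by linear_combination -h1
  have hdiv : a / b = R / b + (a / (c*b)) * c := by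
    conv_lhs => rw [key]
    rw [Int.add_mul_ediv_right _ _ (show b ≠ 0 by omega)]
  rw [hdiv, Int.add_mul_emod_self_right]
  have h2 : 0 ≤ R / b := Int.ediv_nonneg hR0 (by omega)
  have h3 : R / b < c := by
    rw [Int.ediv_lt_iff_lt_mul hb]; linarith [hRlt]
  rw [Int.emod_eq_of_lt h2 h3]

-- A's inner loop in closed form
lemma core_fold (L : List ((Int × Int) × Int)) (h : ∀ t ∈ L, 0 < t.1.2 - t.1.1) (idx : Int) :
    List.foldr bodyA (idx, 0, 1) L =
      (PySem.Int.floordiv idx (dimsProd L),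
       gsrc L (PySem.Int.mod idx (dimsProd L)), shpProd L) := by
  induction L generalizing idx with
  | nil => simp [dimsProd, gsrc, shpProd]
  | cons t L ih =>
      have hd0 : 0 < t.1.2 - t.1.1 := h t (by simp)
      have hP : 0 < dimsProd L := dimsProd_pos L (fun u hu => h u (by simp [hu]))
      rw [List.foldr_cons, ih (fun u hu => h u (by simp [hu]))]
      show (_, _, _) = (_, _, _)
      simp only [gsrc, dimsProd, shpProd]
      rw [PySem.Int.floordiv_eq_ediv_of_pos hP, PySem.Int.floordiv_eq_ediv_of_pos hd0,
          PySem.Int.floordiv_eq_ediv_of_pos (show 0 < (t.1.2 - t.1.1) * dimsProd L by positivity),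
          PySem.Int.mod_eq_emod_of_pos hP, PySem.Int.mod_eq_emod_of_pos hd0,
          PySem.Int.mod_eq_emod_of_pos (show 0 < (t.1.2 - t.1.1) * dimsProd L by positivity),
          PySem.Int.floordiv_eq_ediv_of_pos hP, PySem.Int.mod_eq_emod_of_pos hP]
      simp only [Prod.mk.injEq]
      refine ⟨?_, ?_, trivial⟩
      · rw [Int.ediv_ediv_of_nonneg (le_of_lt hP), mul_comm]
      · rw [emod_mul_ediv' idx (dimsProd L) (t.1.2 - t.1.1) hP hd0,
          Int.emod_emod_of_dvd idx ⟨t.1.2 - t.1.1, mul_comm _ _⟩]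

lemma pyRange_shift (a b c : Int) :
    PySem.List.pyRange (c + a) (c + b) 1 = (PySem.List.pyRange a b 1).map (fun r => c + r) := by
  rw [PySem.List.pyRange_one, PySem.List.pyRange_one]
  have : c + b - (c + a) = b - a := by ring
  rw [this, List.map_map]
  exact List.map_congr_left (fun k _ => by simp; ring)

lemma range_block (d P : Int) (hd : 0 ≤ d) (hP : 0 ≤ P) :
    PySem.List.pyRange 0 (d * P) 1 =
      (PySem.List.pyRange 0 d 1).flatMap
        (fun i => (PySem.List.pyRange 0 P 1).map (fun r => i * P + r)) := by
  obtain ⟨n, rfl⟩ := Int.eq_ofNat_of_zero_le hd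
  clear hd
  induction n with
  | zero => simp [PySem.List.pyRange_one_eq_nil]
  | succ n ih =>
      have h1 : ((n : Int) + 1) * P = (n : Int) * P + P := by ring
      have hcast : ((n + 1 : Nat) : Int) = (n : Int) + 1 := by push_cast; ring
      rw [hcast, h1]
      rw [PySem.List.pyRange_one_append 0 ((n : Int) * P) ((n : Int) * P + P)
            (by positivity) (by linarith),
          PySem.List.pyRange_one_succ_right (by positivity)]
      rw [List.flatMap_append, ih]
      congr 1
      simp only [List.flatMap_cons, List.flatMap_nil, List.append_nil]
      have := pyRange_shift 0 P ((n : Int) * P)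
      simp only [add_zero] at this
      rw [this]

lemma gsrc_block (t : (Int × Int) × Int) (L : List ((Int × Int) × Int))
    (hP : 0 < dimsProd L) (i r : Int) (hr0 : 0 ≤ r) (hr : r < dimsProd L) :
    gsrc (t :: L) (i * dimsProd L + r) = gsrc L r + (i + t.1.1) * shpProd L := by
  have hmod : PySem.Int.mod (i * dimsProd L + r) (dimsProd L) = r := by
    rw [PySem.Int.mod_eq_emod_of_pos hP, add_comm, Int.add_mul_emod_self_right,
        Int.emod_eq_of_lt hr0 hr]
  have hdiv : PySem.Int.floordiv (i * dimsProd L + r) (dimsProd L) = i := by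
    rw [PySem.Int.floordiv_eq_ediv_of_pos hP, add_comm,
        Int.add_mul_ediv_right _ _ (show dimsProd L ≠ 0 by omega),
        Int.ediv_eq_zero_of_lt hr0 hr, zero_add]
  simp only [gsrc, hmod, hdiv]

-- B's walk in closed form: the r-th output element reads flat[off + gsrc L r]
lemma pureGo_eq_map (flat : List Int) (L : List ((Int × Int) × Int))
    (h : ∀ t ∈ L, 0 ≤ t.1.2 - t.1.1) (off : Int) :
    pureGo flat L off =
      (PySem.List.pyRange 0 (dimsProd L) 1).map
        (fun r => PySem.List.pyGetD flat (off + gsrc L r) 0) := by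
  induction L generalizing off with
  | nil => simp [pureGo, dimsProd, gsrc]
  | cons t L ih =>
      have hd0 : 0 ≤ t.1.2 - t.1.1 := h t (by simp)
      have hP : 0 ≤ dimsProd L := dimsProd_nonneg L (fun u hu => h u (by simp [hu]))
      show _ = (PySem.List.pyRange 0 ((t.1.2 - t.1.1) * dimsProd L) 1).map _
      rw [range_block _ _ hd0 hP, List.map_flatMap]
      have hsh : PySem.List.pyRange t.1.1 t.1.2 1 =
          (PySem.List.pyRange 0 (t.1.2 - t.1.1) 1).map (fun r => t.1.1 + r) := by
        have := pyRange_shift 0 (t.1.2 - t.1.1) t.1.1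
        have h2 : t.1.1 + (t.1.2 - t.1.1) = t.1.2 := by ring
        simpa [h2] using this
      show (PySem.List.pyRange t.1.1 t.1.2 1).flatMap _ = _
      rw [hsh, List.flatMap_map]
      refine List.flatMap_congr (fun i hi => ?_)
      obtain ⟨hi0, hid⟩ := (PySem.List.mem_pyRange_one).1 hi
      rw [List.map_map]
      rw [ih (fun u hu => h u (by simp [hu]))]
      refine List.map_congr_left (fun r hr => ?_)
      obtain ⟨hr0, hrP⟩ := (PySem.List.mem_pyRange_one).1 hr
      have hPpos : 0 < dimsProd L := lt_of_le_of_lt hr0 hrP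
      simp only [Function.comp]
      rw [gsrc_block t L hPpos i r hr0 hrP]
      congr 1
      ring

-- A's indexed countdown loop over Nat indices is the foldr of bodyA over bounds.zip shape
lemma idx_foldr (bounds : List (Int × Int)) (shape : List Int)
    (hlen : bounds.length = shape.length) (init : Int × Int × Int) :
    List.foldr
      (fun (k : Nat) (st : Int × Int × Int) =>
        (PySem.Int.floordiv st.1 (PySem.List.pyGetD (bounds.map (fun b => b.2 - b.1)) (k : Int) 0),
         st.2.1 + (PySem.Int.mod st.1 (PySem.List.pyGetD (bounds.map (fun b => b.2 - b.1)) (k : Int) 0)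
             + (PySem.List.pyGetD bounds (k : Int) ((0 : Int), (0 : Int))).1) * st.2.2,
         st.2.2 * PySem.List.pyGetD shape (k : Int) 0))
      init (List.range bounds.length) =
    List.foldr bodyA init (bounds.zip shape) := by
  induction bounds generalizing shape init with
  | nil => simp
  | cons b bs ih =>
      cases shape with
      | nil => simp at hlen
      | cons a as =>
          have hlen' : bs.length = as.length := by simpa using hlen
          rw [List.length_cons, List.range_succ_eq_map, List.foldr_cons, List.foldr_map]
          have hinner :
              (List.foldr (fun (k : Nat) (st : Int × Int × Int) =>
                (PySem.Int.floordiv st.1 (PySem.List.pyGetD ((b :: bs).map (fun b => b.2 - b.1)) ((k.succ : Nat) : Int) 0),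
                 st.2.1 + (PySem.Int.mod st.1 (PySem.List.pyGetD ((b :: bs).map (fun b => b.2 - b.1)) ((k.succ : Nat) : Int) 0)
                     + (PySem.List.pyGetD (b :: bs) ((k.succ : Nat) : Int) ((0 : Int), (0 : Int))).1) * st.2.2,
                 st.2.2 * PySem.List.pyGetD (a :: as) ((k.succ : Nat) : Int) 0))
                init (List.range bs.length)) =
              List.foldr bodyA init (bs.zip as) := by
            rw [← ih as hlen' init]
            congr 1
            funext k st
            simp only [List.map_cons, PySem.List.pyGetD_natCast, List.getD_cons_succ]
          rw [hinner]
          simp [bodyA, PySem.List.pyGetD_zero_cons]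

-- the result-filling loop of A builds the map of f over the index range
lemma setloop_frozen (f : Int → Int) (l : List Int) (xs ys : List Int)
    (h : ∀ i ∈ l, 0 ≤ i ∧ i < (xs.length : Int)) :
    l.foldl (fun res idx => PySem.List.pySetD res idx (f idx)) (xs ++ ys) =
      (l.foldl (fun res idx => PySem.List.pySetD res idx (f idx)) xs) ++ ys := by
  induction l generalizing xs with
  | nil => simp
  | cons i is ih =>
      obtain ⟨hi0, hilt⟩ := h i (by simp)
      rw [List.foldl_cons, List.foldl_cons,
          PySem.List.pySetD_of_nonneg _ _ hi0, PySem.List.pySetD_of_nonneg _ _ hi0,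
          List.set_append_left _ _ (by omega)]
      exact ih _ (fun j hj => by
        have := h j (by simp [hj]); simpa [List.length_set] using this)

lemma setloop (f : Int → Int) (n : Nat) :
    (PySem.List.pyRange 0 (n : Int) 1).foldl
        (fun res idx => PySem.List.pySetD res idx (f idx)) (List.replicate n 0) =
      (PySem.List.pyRange 0 (n : Int) 1).map f := by
  induction n with
  | zero => simp [PySem.List.pyRange_one_eq_nil]
  | succ n ih =>
      have hcast : ((n + 1 : Nat) : Int) = (n : Int) + 1 := by push_cast; ring
      rw [hcast, PySem.List.pyRange_one_succ_right (by positivity),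
          List.foldl_append, List.map_append]
      rw [List.replicate_succ']
      rw [setloop_frozen f _ _ _ (fun i hi => by
            obtain ⟨h1, h2⟩ := PySem.List.mem_pyRange_one.1 hi
            simp; omega), ih]
      simp only [List.foldl_cons, List.foldl_nil, List.map_cons, List.map_nil]
      rw [PySem.List.pySetD_of_nonneg _ _ (by positivity)]
      have hlen : (List.map f (PySem.List.pyRange 0 (n:Int) 1)).length = n := by
        simp [PySem.List.length_pyRange_one]
      rw [List.set_append_right _ _ (by simp [hlen])]
      simp [hlen]

lemma shpProd_zip (bounds : List (Int × Int)) (shape : List Int)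
    (hlen : bounds.length = shape.length) :
    shpProd (bounds.zip shape) = shape.prod := by
  induction bounds generalizing shape with
  | nil => cases shape with
    | nil => simp [shpProd]
    | cons a l => simp at hlen
  | cons b bs ih =>
      cases shape with
      | nil => simp at hlen
      | cons a l =>
          simp only [List.zip_cons_cons, shpProd, List.prod_cons]
          rw [ih l (by simpa using hlen), mul_comm]

lemma altLoop_eq (g : Int → List Int → List Int) (pg : Int → List Int) (st : Int)
    (hg : ∀ o out, g o out = out ++ pg o) (l : List Int) (off : Int) (out : List Int) :
    altLoop g st l off out = out ++ l.flatMap (fun i => pg (off + i * st)) := by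
  induction l generalizing out with
  | nil => simp [altLoop]
  | cons i is ih => simp [altLoop, ih, hg]

lemma altGo_eq (flat : List Int) (bounds : List (Int × Int)) (shape : List Int)
    (hlen : bounds.length = shape.length) (off : Int) (out : List Int) :
    altGo flat (bounds.zip (sufProds shape)) off out = out ++ pureGo flat (bounds.zip shape) off := by
  induction bounds generalizing shape off out with
  | nil =>
      cases shape with
      | nil => simp [altGo, pureGo, sufProds]
      | cons a l => simp at hlen
  | cons b bs ih =>
      cases shape with
      | nil => simp at hlen
      | cons a as =>
          have hlen' : bs.length = as.length := by simpa using hlen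
          simp only [sufProds, List.zip_cons_cons, altGo, pureGo]
          rw [altLoop_eq _ (pureGo flat (bs.zip as)) _ (fun o acc => ih as hlen' o acc)]
          rw [shpProd_zip bs as hlen']

lemma pref_append (u v : List Int) (st : Int) :
    pref (u ++ v) st = pref u st ++ pref v (st * u.prod) := by
  induction u generalizing st with
  | nil => simp [pref]
  | cons x xs ih => simp [pref, ih, mul_assoc]

lemma strideFold (r : List Int) (acc : List Int) (st : Int) :
    r.foldl (fun (p : List Int × Int) s => (p.1 ++ [p.2], p.2 * s)) (acc, st) =
      (acc ++ pref r st, st * r.prod) := by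
  induction r generalizing acc st with
  | nil => simp [pref]
  | cons x xs ih => simp [pref, ih, mul_assoc]

lemma strides_eq_sufProds (shape : List Int) :
    (pref shape.reverse 1).reverse = sufProds shape := by
  induction shape with
  | nil => simp [pref, sufProds]
  | cons a l ih =>
      simp only [List.reverse_cons, pref_append, List.reverse_append, sufProds, pref]
      simp [ih]

lemma dimsProd_zip (bounds : List (Int × Int)) (shape : List Int)
    (hlen : bounds.length = shape.length) :
    (bounds.map (fun b => b.2 - b.1)).foldl (fun acc s => acc * s) 1 =
      dimsProd (bounds.zip shape) := by
  rw [show (fun (acc : Int) (s : Int) => acc * s) = (· * ·) from rfl, ← List.prod_eq_foldl]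
  induction bounds generalizing shape with
  | nil => cases shape with
    | nil => simp [dimsProd]
    | cons a l => simp at hlen
  | cons b bs ih =>
      cases shape with
      | nil => simp at hlen
      | cons a as =>
          simp only [List.map_cons, List.prod_cons, List.zip_cons_cons, dimsProd]
          rw [ih as (by simpa using hlen)]

-- A returns [] whenever its element count is ≤ 0
lemma shrinkA_nil (flat : List Int) (shape : List Int) (bounds : List (Int × Int))
    (hple : (bounds.map (fun b => b.2 - b.1)).prod ≤ 0) :
    shrink_data_py flat shape bounds = [] := by
  simp only [shrink_data_py]
  rw [show (fun (acc : Int) (s : Int) => acc * s) = (· * ·) from rfl, ← List.prod_eq_foldl,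
      PySem.List.pyRange_one_eq_nil hple, List.foldl_nil,
      Int.toNat_of_nonpos hple, List.replicate_zero]

-- A's whole inner loop (countdown over dimension indices) equals the foldr of bodyA
lemma shrinkInner_eq_foldr (bounds : List (Int × Int)) (shape : List Int)
    (hlen : bounds.length = shape.length) (idx : Int) :
    shrinkInner (bounds.map (fun b => b.2 - b.1)) bounds shape (PySem.List.len shape) idx =
      List.foldr bodyA (idx, 0, 1) (bounds.zip shape) := by
  unfold shrinkInner
  rw [PySem.List.len_eq, PySem.List.pyRange_neg_one_eq_reverse]
  have h1 : (-1 : Int) + 1 = 0 := by ring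
  have h2 : (shape.length : Int) - 1 + 1 = (shape.length : Int) := by ring
  rw [h1, h2, List.foldl_reverse, PySem.List.pyRange_zero_natCast, List.foldr_map,
      ← hlen]
  exact idx_foldr bounds shape hlen (idx, 0, 1)

-- ===== VERDICT (by name: the statement is the Claim_ definition above) =====
theorem shrink_data_py_spec : Claim_equal_shrink_data_py := by
  intro flat shape bounds _ hpre
  unfold Spec_shrink_data_py
  rcases hpre with hple | ⟨hlen, hb, _⟩
  · -- empty region: both sides return []
    have hex : ∃ b ∈ bounds, b.2 ≤ b.1 := by
      by_contra hno
      push Not at hno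
      have : (0 : Int) < (bounds.map (fun b => b.2 - b.1)).prod :=
        List.prod_pos (fun x hx => by
          obtain ⟨b, hbmem, rfl⟩ := List.mem_map.1 hx
          have := hno b hbmem; omega)
      omega
    have hB : shrink_data_py_alt flat shape bounds = [] := by
      obtain ⟨b, hbmem, hble⟩ := hex
      simp only [shrink_data_py_alt]
      rw [if_pos (List.any_eq_true.2 ⟨b, hbmem, by simpa using hble⟩)]
    rw [shrinkA_nil flat shape bounds hple, hB]
  by_cases hg : bounds.any (fun b => decide (b.2 ≤ b.1))
  · -- some bound is empty: within the natural domain its extent is 0, so both return []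
    have hB : shrink_data_py_alt flat shape bounds = [] := by
      simp only [shrink_data_py_alt]; rw [if_pos hg]
    obtain ⟨b, hbmem, hble⟩ := List.any_eq_true.1 hg
    have hble' : b.2 ≤ b.1 := by simpa using hble
    obtain ⟨k, hk, hbk⟩ := List.mem_iff_getElem.1 hbmem
    have hk2 : k < shape.length := by omega
    have hzmem : (b, shape[k]) ∈ bounds.zip shape := by
      rw [← hbk]
      exact List.mem_iff_getElem.2 ⟨k, by simp [List.length_zip]; omega, by simp [List.getElem_zip]⟩
    have hbz := hb (b, shape[k]) hzmem
    have hdim0 : b.2 - b.1 = 0 := by simp at hbz; omega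
    have hzero : (0 : Int) ∈ bounds.map (fun b => b.2 - b.1) := by
      exact List.mem_map.2 ⟨b, hbmem, hdim0⟩
    rw [shrinkA_nil flat shape bounds (le_of_eq (List.prod_eq_zero hzero)), hB]
  -- all bounds are non-empty: the generic correspondence
  have hdims : ∀ t ∈ bounds.zip shape, 0 ≤ t.1.2 - t.1.1 := by
    intro t ht; have := hb t ht; omega
  -- B side
  have hB : shrink_data_py_alt flat shape bounds = pureGo flat (bounds.zip shape) 0 := by
    simp only [shrink_data_py_alt]
    rw [if_neg (by simpa using hg), strideFold]
    show altGo flat (bounds.zip ((pref shape.reverse 1).reverse)) 0 [] = _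
    rw [strides_eq_sufProds]
    exact altGo_eq flat bounds shape hlen.symm 0 []
  -- A side
  have hnum : (bounds.map (fun b => b.2 - b.1)).foldl (fun acc s => acc * s) 1 =
      dimsProd (bounds.zip shape) := dimsProd_zip bounds shape hlen.symm
  have hPnn : 0 ≤ dimsProd (bounds.zip shape) := dimsProd_nonneg _ hdims
  have hA : shrink_data_py flat shape bounds =
      (PySem.List.pyRange 0 (dimsProd (bounds.zip shape)) 1).map
        (fun idx => PySem.List.pyGetD flat
          (shrinkInner (bounds.map (fun b => b.2 - b.1)) bounds shape (PySem.List.len shape) idx).2.1 0) := by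
    simp only [shrink_data_py]
    rw [hnum]
    have hn : dimsProd (bounds.zip shape) = ((dimsProd (bounds.zip shape)).toNat : Int) :=
      (Int.toNat_of_nonneg hPnn).symm
    rw [hn]
    exact setloop _ _
  rw [hA, hB, pureGo_eq_map flat _ hdims 0]
  refine List.map_congr_left (fun idx hidx => ?_)
  obtain ⟨hi0, hiP⟩ := PySem.List.mem_pyRange_one.1 hidx
  have hPpos : 0 < dimsProd (bounds.zip shape) := lt_of_le_of_lt hi0 hiP
  have hpos := dims_pos_of_prod_pos _ hdims hPpos
  rw [shrinkInner_eq_foldr bounds shape hlen.symm idx,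
      core_fold _ hpos idx]
  have hmod : PySem.Int.mod idx (dimsProd (bounds.zip shape)) = idx := by
    rw [PySem.Int.mod_eq_emod_of_pos hPpos, Int.emod_eq_of_lt hi0 hiP]
  rw [hmod]
  norm_num
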